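-- pv_equiv track=rewrite | github.com/smilybrits/ai-car-game | track.py | _ordered_search_pixels
-- ===== SOURCE A (Python) =====
-- def _ordered_search_pixels(
--
--     sorted_pixels: list[tuple[int, int]],
--     middle_index: int,
-- ) -> list[tuple[int, int]]:
--     """Return pixels ordered from center outward for deterministic fallback search."""
--     ordered: list[tuple[int, int]] = []
--     used: set[int] = set()
--     total = len(sorted_pixels)
--
--     for distance in range(total):
--         left = middle_index - distance
--         right = middle_index + distance
--
--         if 0 <= left < total and left not in used:
--             ordered.append(sorted_pixels[left])
--             used.add(left)
--
--         if 0 <= right < total and right not in used: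
--             ordered.append(sorted_pixels[right])
--             used.add(right)
--
--         if len(ordered) == total:
--             break
--
--     return ordered
-- ===== SOURCE B (Python) =====
-- def _ordered_search_pixels(
--     sorted_pixels: list[tuple[int, int]],
--     middle_index: int,
-- ) -> list[tuple[int, int]]:
--     """Return pixels ordered from center outward for deterministic fallback search.
--
--     The search expands one step per iteration for at most len(sorted_pixels)
--     iterations, so only indices within that radius of the center are reachable:
--     collect that window, clipped to the list, and sort it from the center
--     outward (ties at a distance take the left index first).
--     """
--     total = len(sorted_pixels)
--     lo = max(middle_index - total + 1, 0)
--     hi = min(middle_index + total, total)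
--     order = sorted(range(lo, hi), key=lambda i: (abs(i - middle_index), i > middle_index))
--     return [sorted_pixels[i] for i in order]
-- ===== Notes on version B (the rewrite author's own statement) =====
-- stated objective: simpler
-- what changed: Replaces the two-pointer outward walk with mutated ordered/used state and an early break by computing the reachable index window (the search budget is len(sorted_pixels) expansion steps) clipped to the list, sorting it once by (distance from middle, side), and indexing in one pass; the used-set, the pointer arithmetic and the break disappear.
import Mathlib
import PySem

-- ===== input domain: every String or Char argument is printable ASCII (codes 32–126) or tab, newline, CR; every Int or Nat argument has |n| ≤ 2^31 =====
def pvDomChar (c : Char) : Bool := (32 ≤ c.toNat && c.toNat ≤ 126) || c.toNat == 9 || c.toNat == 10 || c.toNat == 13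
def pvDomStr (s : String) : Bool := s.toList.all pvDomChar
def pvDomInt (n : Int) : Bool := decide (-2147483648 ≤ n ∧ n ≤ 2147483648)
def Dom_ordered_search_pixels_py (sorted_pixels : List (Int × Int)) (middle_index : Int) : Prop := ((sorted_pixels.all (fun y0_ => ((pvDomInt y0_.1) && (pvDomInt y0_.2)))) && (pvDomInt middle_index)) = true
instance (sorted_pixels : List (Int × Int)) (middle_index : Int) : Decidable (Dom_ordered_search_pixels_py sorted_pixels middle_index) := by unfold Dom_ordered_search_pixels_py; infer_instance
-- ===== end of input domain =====

-- B replaces A's two-pointer outward walk (ordered list + used set + early break) by one sort of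
-- the reachable index window keyed by (distance from the middle, side) and a single map;
-- proved equal to A on every input (no precondition).


-- ===== PORT A =====
-- the for-distance loop: state = (ordered, used); the guarded indexings sorted_pixels[left]/[right]
-- are in range by their guard, so pyGetD with a dummy default is exact there
def pvAStep (sorted_pixels : List (Int × Int)) (middle_index total : Int) :
    List Int → List (Int × Int) → PySem.Set Int → List (Int × Int)
  | [], ordered, _ => ordered
  | d :: ds, ordered, used =>
    let left := middle_index - d
    let right := middle_index + d
    let s1 : List (Int × Int) × PySem.Set Int :=
      if 0 ≤ left ∧ left < total ∧ PySem.Set.contains used left = false then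
        (ordered ++ [PySem.List.pyGetD sorted_pixels left (0, 0)], PySem.Set.add used left)
      else (ordered, used)
    let s2 : List (Int × Int) × PySem.Set Int :=
      if 0 ≤ right ∧ right < total ∧ PySem.Set.contains s1.2 right = false then
        (s1.1 ++ [PySem.List.pyGetD sorted_pixels right (0, 0)], PySem.Set.add s1.2 right)
      else s1
    if PySem.List.len s2.1 = total then s2.1
    else pvAStep sorted_pixels middle_index total ds s2.1 s2.2

def ordered_search_pixels_py (sorted_pixels : List (Int × Int)) (middle_index : Int) : List (Int × Int) :=
  let total := PySem.List.len sorted_pixels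
  pvAStep sorted_pixels middle_index total (PySem.List.pyRange 0 total 1) [] PySem.Set.empty

-- ===== PORT B =====
-- sorted(range(lo, hi), key=lambda i: (abs(i - middle_index), i > middle_index)) → sorted2
def ordered_search_pixels_py_alt (sorted_pixels : List (Int × Int)) (middle_index : Int) : List (Int × Int) :=
  let total := PySem.List.len sorted_pixels
  let lo := max (middle_index - total + 1) 0
  let hi := min (middle_index + total) total
  let order := PySem.List.sorted2 (PySem.List.pyRange lo hi 1)
    (fun i => |i - middle_index|) (fun i => decide (middle_index < i)) false
  order.map (fun i => PySem.List.pyGetD sorted_pixels i (0, 0))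

-- ===== PRECONDITION & SPEC =====
def Spec_ordered_search_pixels_py (sorted_pixels : List (Int × Int)) (middle_index : Int) (out : List (Int × Int)) : Prop := out = ordered_search_pixels_py_alt sorted_pixels middle_index
instance (sorted_pixels : List (Int × Int)) (middle_index : Int) (out : List (Int × Int)) : Decidable (Spec_ordered_search_pixels_py sorted_pixels middle_index out) := by unfold Spec_ordered_search_pixels_py; infer_instance

-- ===== CLAIM (what is proved, stated in full; the proofs are below) =====
def Claim_equal_ordered_search_pixels_py : Prop := ∀ (sorted_pixels : List (Int × Int)) (middle_index : Int), Dom_ordered_search_pixels_py sorted_pixels middle_index → Spec_ordered_search_pixels_py sorted_pixels middle_index (ordered_search_pixels_py sorted_pixels middle_index)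

-- ===== LEMMAS AND PROOFS =====

-- helpers describing A's emission order, proof-side only
def pvEmit (m total d : Int) : List Int :=
  (if 0 ≤ m - d ∧ m - d < total then [m - d] else []) ++
  (if d ≠ 0 ∧ 0 ≤ m + d ∧ m + d < total then [m + d] else [])

def pvSeg (m total a b : Int) : List Int := (PySem.List.pyRange a b 1).flatMap (pvEmit m total)

def pvKey (m i : Int) : Int := 2 * |i - m| + (if m < i then 1 else 0)

lemma mem_pvEmit {m total d i : Int} (hd : 0 ≤ d) :
    i ∈ pvEmit m total d ↔ (0 ≤ i ∧ i < total ∧ |i - m| = d) := by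
  unfold pvEmit
  simp [List.mem_append]
  rcases abs_cases (i - m) with ⟨h1, h2⟩ | ⟨h1, h2⟩ <;> rw [h1] <;> omega

lemma mem_pvSeg {m total a b i : Int} (ha : 0 ≤ a) :
    i ∈ pvSeg m total a b ↔ (0 ≤ i ∧ i < total ∧ a ≤ |i - m| ∧ |i - m| < b) := by
  unfold pvSeg
  simp only [List.mem_flatMap, PySem.List.mem_pyRange_one]
  constructor
  · rintro ⟨d, ⟨had, hdb⟩, hi⟩
    have h' := (mem_pvEmit (ha.trans had)).1 hi
    exact ⟨h'.1, h'.2.1, by omega⟩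
  · rintro ⟨h1, h2, h3, h4⟩
    exact ⟨|i - m|, ⟨h3, h4⟩, (mem_pvEmit (abs_nonneg _)).2 ⟨h1, h2, rfl⟩⟩

lemma pvKey_emit {m total d i : Int} (hd : 0 ≤ d) (h : i ∈ pvEmit m total d) :
    pvKey m i = 2 * d ∨ pvKey m i = 2 * d + 1 := by
  have h' := (mem_pvEmit hd).1 h
  unfold pvKey
  rw [h'.2.2]
  split_ifs <;> omega

lemma pvKey_left {m d : Int} (hd : 0 ≤ d) : pvKey m (m - d) = 2 * d := by
  unfold pvKey
  rw [show m - d - m = -d by ring, abs_neg, abs_of_nonneg hd]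
  split_ifs with h <;> omega

lemma pvKey_right {m d : Int} (hd : 0 < d) : pvKey m (m + d) = 2 * d + 1 := by
  unfold pvKey
  rw [show m + d - m = d by ring, abs_of_nonneg (le_of_lt hd)]
  split_ifs with h <;> omega

lemma pairwise_pvSeg {m total a b : Int} (ha : 0 ≤ a) :
    (pvSeg m total a b).Pairwise (fun x y => pvKey m x < pvKey m y) := by
  have H : ∀ n : Nat, ∀ a : Int, 0 ≤ a → (b - a).toNat = n →
      (pvSeg m total a b).Pairwise (fun x y => pvKey m x < pvKey m y) := by
    intro n
    induction n with
    | zero =>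
      intro a ha h0
      unfold pvSeg
      rw [PySem.List.pyRange_one_eq_nil (by omega)]
      simp
    | succ k ih =>
      intro a ha hk
      have hab : a < b := by omega
      unfold pvSeg
      rw [PySem.List.pyRange_one_cons hab, List.flatMap_cons]
      apply List.pairwise_append.2
      refine ⟨?_, ih (a + 1) (by omega) (by omega), ?_⟩
      · unfold pvEmit
        split_ifs with h1 h2 h2 <;> simp_all
        rw [pvKey_left ha, pvKey_right (by omega)]
        omega
      · intro x hx y hy
        have hkx := pvKey_emit ha hx
        have hy' := (mem_pvSeg (show (0:Int) ≤ a + 1 by omega)).1 hy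
        have habs := hy'.2.2.1
        have hky : 2 * (a + 1) ≤ pvKey m y := by
          unfold pvKey
          have := abs_nonneg (y - m)
          split_ifs <;> omega
        cases hkx <;> omega
  exact H (b - a).toNat a ha rfl

lemma nodup_pvSeg {m total a b : Int} (ha : 0 ≤ a) : (pvSeg m total a b).Nodup := by
  exact (pairwise_pvSeg ha).imp (fun h => fun he => absurd (he ▸ h) (lt_irrefl _))

lemma pvSeg_split {m total a c b : Int} (h1 : a ≤ c) (h2 : c ≤ b) :
    pvSeg m total a b = pvSeg m total a c ++ pvSeg m total c b := by
  unfold pvSeg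
  rw [PySem.List.pyRange_one_append a c b h1 h2, List.flatMap_append]

lemma pvSeg_succ {m total t : Int} (ht : 0 ≤ t) :
    pvSeg m total 0 (t + 1) = pvSeg m total 0 t ++ pvEmit m total t := by
  rw [pvSeg_split ht (by omega : t ≤ t + 1)]
  congr 1
  unfold pvSeg
  rw [PySem.List.pyRange_one_singleton]
  simp

lemma pvAStep_cons (xs : List (Int × Int)) (m total t : Int) (ds : List Int)
    (ordered : List (Int × Int)) (used : PySem.Set Int) (ht0 : 0 ≤ t)
    (hcl : PySem.Set.contains used (m - t) = false)
    (hcr : PySem.Set.contains used (m + t) = false) :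
    pvAStep xs m total (t :: ds) ordered used =
      if PySem.List.len (ordered ++ (pvEmit m total t).map (fun i => PySem.List.pyGetD xs i (0, 0))) = total
      then ordered ++ (pvEmit m total t).map (fun i => PySem.List.pyGetD xs i (0, 0))
      else pvAStep xs m total ds
        (ordered ++ (pvEmit m total t).map (fun i => PySem.List.pyGetD xs i (0, 0)))
        (PySem.Set.update used (pvEmit m total t)) := by
  have hcrP : ¬ (m + t) ∈ used := fun h => by
    rw [(PySem.Set.contains_iff used (m + t)).2 h] at hcr; cases hcr
  simp only [pvAStep]
  by_cases hl : 0 ≤ m - t ∧ m - t < total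
  · have c1 : (0 ≤ m - t ∧ m - t < total ∧ PySem.Set.contains used (m - t) = false) :=
      ⟨hl.1, hl.2, hcl⟩
    rw [if_pos c1]
    by_cases hzero : t = 0
    · subst hzero
      have hctrue : PySem.Set.contains (PySem.Set.add used (m - 0)) (m + 0) = true := by
        rw [PySem.Set.contains_iff, PySem.Set.mem_add]
        exact Or.inr (by omega)
      have c2 : ¬ (0 ≤ m + 0 ∧ m + 0 < total ∧
          PySem.Set.contains ((ordered ++ [PySem.List.pyGetD xs (m - 0) (0, 0)],
            PySem.Set.add used (m - 0)) : List (Int × Int) × PySem.Set Int).2 (m + 0) = false) := by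
        intro h
        rw [show ((ordered ++ [PySem.List.pyGetD xs (m - 0) (0, 0)],
          PySem.Set.add used (m - 0)) : List (Int × Int) × PySem.Set Int).2
            = PySem.Set.add used (m - 0) from rfl, hctrue] at h
        exact absurd h.2.2 (by simp)
      rw [if_neg c2]
      have e1 : (0 ≤ m - 0 ∧ m - 0 < total) := hl
      have e2 : ¬ ((0:Int) ≠ 0 ∧ 0 ≤ m + 0 ∧ m + 0 < total) := fun h => h.1 rfl
      unfold pvEmit
      rw [if_pos e1, if_neg e2]
      simp [PySem.Set.update]
    · have hcfalse : PySem.Set.contains (PySem.Set.add used (m - t)) (m + t) = false := by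
        rcases Bool.eq_false_or_eq_true (PySem.Set.contains (PySem.Set.add used (m - t)) (m + t)) with h | h
        case inr => exact h
        · exfalso
          rcases (PySem.Set.mem_add _ _ _).1 ((PySem.Set.contains_iff _ _).1 h) with h2 | h2
          · exact hcrP h2
          · omega
      by_cases hr : 0 ≤ m + t ∧ m + t < total
      · have c2 : (0 ≤ m + t ∧ m + t < total ∧
            PySem.Set.contains ((ordered ++ [PySem.List.pyGetD xs (m - t) (0, 0)],
              PySem.Set.add used (m - t)) : List (Int × Int) × PySem.Set Int).2 (m + t) = false) :=
          ⟨hr.1, hr.2, hcfalse⟩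
        rw [if_pos c2]
        have e1 : (0 ≤ m - t ∧ m - t < total) := hl
        have e2 : (t ≠ 0 ∧ 0 ≤ m + t ∧ m + t < total) := ⟨hzero, hr⟩
        unfold pvEmit
        rw [if_pos e1, if_pos e2]
        simp [PySem.Set.update]
      · have c2 : ¬ (0 ≤ m + t ∧ m + t < total ∧
            PySem.Set.contains ((ordered ++ [PySem.List.pyGetD xs (m - t) (0, 0)],
              PySem.Set.add used (m - t)) : List (Int × Int) × PySem.Set Int).2 (m + t) = false) :=
          fun h => hr ⟨h.1, h.2.1⟩
        rw [if_neg c2]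
        have e1 : (0 ≤ m - t ∧ m - t < total) := hl
        have e2 : ¬ (t ≠ 0 ∧ 0 ≤ m + t ∧ m + t < total) := fun h => hr h.2
        unfold pvEmit
        rw [if_pos e1, if_neg e2]
        simp [PySem.Set.update]
  · have c1 : ¬ (0 ≤ m - t ∧ m - t < total ∧ PySem.Set.contains used (m - t) = false) :=
      fun h => hl ⟨h.1, h.2.1⟩
    rw [if_neg c1]
    by_cases hr : 0 ≤ m + t ∧ m + t < total
    · have c2 : (0 ≤ m + t ∧ m + t < total ∧
          PySem.Set.contains ((ordered, used) : List (Int × Int) × PySem.Set Int).2 (m + t) = false) :=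
        ⟨hr.1, hr.2, hcr⟩
      rw [if_pos c2]
      have hzero : t ≠ 0 := fun h => by subst h; exact hl (by simpa using hr)
      have e1 : ¬ (0 ≤ m - t ∧ m - t < total) := hl
      have e2 : (t ≠ 0 ∧ 0 ≤ m + t ∧ m + t < total) := ⟨hzero, hr⟩
      unfold pvEmit
      rw [if_neg e1, if_pos e2]
      simp [PySem.Set.update]
    · have c2 : ¬ (0 ≤ m + t ∧ m + t < total ∧
          PySem.Set.contains ((ordered, used) : List (Int × Int) × PySem.Set Int).2 (m + t) = false) :=
        fun h => hr ⟨h.1, h.2.1⟩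
      rw [if_neg c2]
      have e1 : ¬ (0 ≤ m - t ∧ m - t < total) := hl
      have e2 : ¬ (t ≠ 0 ∧ 0 ≤ m + t ∧ m + t < total) := fun h => hr h.2
      unfold pvEmit
      rw [if_neg e1, if_neg e2]
      simp [PySem.Set.update]

lemma pvAStep_eq (xs : List (Int × Int)) (m total : Int) (htot : 0 ≤ total) :
    ∀ (n : Nat) (t : Int) (used : PySem.Set Int), 0 ≤ t → t ≤ total → total - t ≤ (n : Int) →
    (∀ i : Int, PySem.Set.contains used i = true ↔ i ∈ pvSeg m total 0 t) →
    pvAStep xs m total (PySem.List.pyRange t total 1)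
        ((pvSeg m total 0 t).map (fun i => PySem.List.pyGetD xs i (0, 0))) used
      = (pvSeg m total 0 total).map (fun i => PySem.List.pyGetD xs i (0, 0)) := by
  intro n
  induction n with
  | zero =>
    intro t used ht0 htle hn hused
    have : t = total := by omega
    subst this
    rw [PySem.List.pyRange_one_eq_nil le_rfl]
    rfl
  | succ k ih =>
    intro t used ht0 htle hn hused
    by_cases hteq : t = total
    · subst hteq; rw [PySem.List.pyRange_one_eq_nil le_rfl]; rfl
    have htlt : t < total := by omega
    rw [PySem.List.pyRange_one_cons htlt]
    have habsL : |m - t - m| = t := by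
      rw [show m - t - m = -t by ring, abs_neg, abs_of_nonneg ht0]
    have habsR : |m + t - m| = t := by
      rw [show m + t - m = t by ring, abs_of_nonneg ht0]
    have hcl : PySem.Set.contains used (m - t) = false := by
      rcases Bool.eq_false_or_eq_true (PySem.Set.contains used (m - t)) with h | h
      case inr => exact h
      · exfalso
        have h2 := (hused _).1 h
        rw [mem_pvSeg le_rfl, habsL] at h2
        omega
    have hcr : PySem.Set.contains used (m + t) = false := by
      rcases Bool.eq_false_or_eq_true (PySem.Set.contains used (m + t)) with h | h
      case inr => exact h
      · exfalso
        have h2 := (hused _).1 h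
        rw [mem_pvSeg le_rfl, habsR] at h2
        omega
    rw [pvAStep_cons xs m total t _ _ _ ht0 hcl hcr, ← List.map_append, ← pvSeg_succ ht0]
    by_cases hbrk : PySem.List.len ((pvSeg m total 0 (t + 1)).map (fun i => PySem.List.pyGetD xs i (0, 0))) = total
    · rw [if_pos hbrk]
      have hlen : (pvSeg m total 0 (t + 1)).length = total.toNat := by
        simp [PySem.List.len] at hbrk
        omega
      have hsub : pvSeg m total 0 (t + 1) ⊆ PySem.List.pyRange 0 total 1 := by
        intro i hi
        rw [mem_pvSeg le_rfl] at hi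
        exact PySem.List.mem_pyRange_one.2 ⟨hi.1, hi.2.1⟩
      have hsp := List.subperm_of_subset (nodup_pvSeg le_rfl) hsub
      have hperm := hsp.perm_of_length_le (by rw [hlen, PySem.List.length_pyRange_one]; omega)
      have hall : ∀ i : Int, 0 ≤ i → i < total → |i - m| < t + 1 := by
        intro i h1 h2
        have : i ∈ pvSeg m total 0 (t + 1) :=
          hperm.mem_iff.2 (PySem.List.mem_pyRange_one.2 ⟨h1, h2⟩)
        rw [mem_pvSeg le_rfl] at this
        exact this.2.2.2
      have hnil : pvSeg m total (t + 1) total = [] := by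
        rw [List.eq_nil_iff_forall_not_mem]
        intro i hi
        rw [mem_pvSeg (by omega : (0:Int) ≤ t + 1)] at hi
        have := hall i hi.1 hi.2.1
        omega
      rw [pvSeg_split (by omega : (0:Int) ≤ t + 1) (by omega : t + 1 ≤ total), hnil,
        List.append_nil]
    · rw [if_neg hbrk]
      apply ih (t + 1) _ (by omega) (by omega) (by omega)
      intro i
      rw [PySem.Set.contains_iff, PySem.Set.mem_update, pvSeg_succ ht0, List.mem_append,
        ← PySem.Set.contains_iff, hused, mem_pvSeg le_rfl]

-- B's tuple key (|i-m|, i>m) compares as the single integer key pvKey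
lemma sorted2_eq_sorted_pvKey (xs : List Int) (m : Int) :
    PySem.List.sorted2 xs (fun i => |i - m|) (fun i => decide (m < i)) false
      = PySem.List.sorted xs (pvKey m) false := by
  have hbefore : (fun (a b : Int) =>
        decide (|a - m| < |b - m|) ||
          (!decide (|b - m| < |a - m|) && decide ((decide (m < a)) < (decide (m < b)))))
      = (fun (a b : Int) => decide (pvKey m a < pvKey m b)) := by
    funext a b
    rcases abs_cases (a - m) with ⟨e1, f1⟩ | ⟨e1, f1⟩ <;>
      rcases abs_cases (b - m) with ⟨e2, f2⟩ | ⟨e2, f2⟩ <;>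
      rw [pvKey, pvKey, e1, e2] <;>
      by_cases h1 : m < a <;> by_cases h2 : m < b <;>
      (simp [h1, h2, Bool.lt_iff]; try (rw [Bool.eq_iff_iff]; simp)) <;> omega
  rw [PySem.List.sorted_eq_foldl_insertBy]
  show List.foldl (fun acc x => PySem.List.insertBy (fun a b =>
        decide (|a - m| < |b - m|) ||
          (!decide (|b - m| < |a - m|) && decide ((decide (m < a)) < (decide (m < b))))) x acc) [] xs = _
  rw [hbefore]

-- the reachable window, sorted by the key, IS A's emission order pvSeg
lemma sorted_eq_pvSeg (m total : Int) :
    PySem.List.sorted (PySem.List.pyRange (max (m - total + 1) 0) (min (m + total) total) 1)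
        (pvKey m) false
      = pvSeg m total 0 total := by
  have hperm : (pvSeg m total 0 total).Perm
      (PySem.List.pyRange (max (m - total + 1) 0) (min (m + total) total) 1) := by
    refine (List.perm_ext_iff_of_nodup (nodup_pvSeg le_rfl)
      (PySem.List.nodup_pyRange_one _ _)).2 ?_
    intro i
    rw [mem_pvSeg le_rfl, PySem.List.mem_pyRange_one]
    rcases abs_cases (i - m) with ⟨e, _⟩ | ⟨e, _⟩ <;> rw [e] <;> omega
  exact PySem.List.sorted_eq_of_perm_of_pairwise_lt _ _ _ hperm (pairwise_pvSeg le_rfl)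

-- ===== VERDICT (by name: the statement is the Claim_ definition above) =====
theorem ordered_search_pixels_py_spec : Claim_equal_ordered_search_pixels_py := by
  intro xs m _
  unfold Spec_ordered_search_pixels_py
  simp only [ordered_search_pixels_py, ordered_search_pixels_py_alt]
  have htot0 : (0:Int) ≤ PySem.List.len xs := by simp [PySem.List.len]
  have hseg0 : pvSeg m (PySem.List.len xs) 0 0 = [] := by
    unfold pvSeg
    rw [PySem.List.pyRange_one_eq_nil le_rfl]
    rfl
  have hused : ∀ i : Int,
      PySem.Set.contains (PySem.Set.empty : PySem.Set Int) i = true ↔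
        i ∈ pvSeg m (PySem.List.len xs) 0 0 := by
    intro i
    rw [PySem.Set.contains_iff, hseg0]
    simp [PySem.Set.empty]
  have h := pvAStep_eq xs m (PySem.List.len xs) htot0 (PySem.List.len xs).toNat 0
    PySem.Set.empty le_rfl htot0 (by omega) hused
  rw [hseg0] at h
  simp only [List.map_nil] at h
  rw [sorted2_eq_sorted_pvKey, sorted_eq_pvSeg]
  exact h
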